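-- pv_equiv track=rewrite | github.com/Junjie-Ye/CCTU | data/check_code/21/check_constraint_3.py | _check_aligned_columns
-- ===== SOURCE A (Python) =====
-- from typing import Tuple, List, Optional
--
-- def _line_starts_and_ends_with_pipe(line: str) -> bool:
--     line = line.rstrip("\n")
--     return line.strip().startswith("|") and line.strip().endswith("|")
--
-- def _raw_segments(line: str) -> Optional[List[str]]:
--     """
--     Return raw (untrimmed) cell segments between pipes.
--     Requires the line to start and end with '|'.
--     """
--     if not _line_starts_and_ends_with_pipe(line):
--         return None
--     parts = line.strip().split("|")
--     # strip() puts empty '' at both ends because of leading/trailing pipe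
--     # e.g. "| a | b |" -> ["", " a ", " b ", ""]
--     if len(parts) < 3:
--         return None
--     return parts[1:-1]  # raw, includes spaces for width checks
--
-- def _check_aligned_columns(lines: List[str]) -> Tuple[bool, str]:
--     """
--     Check that all provided lines have:
--     - same number of columns
--     - consistent column widths via space padding (so '|' align vertically)
--     This is enforced by requiring each column segment to have the same length across lines.
--     """
--     if not lines:
--         return False, "No lines provided to alignment checker."
--     seg_lists: List[List[str]] = []
--     for idx, line in enumerate(lines):
--         segs = _raw_segments(line)
--         if segs is None:
--             return False, f"Line {idx + 1} does not start and end with '|' or is malformed."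
--         seg_lists.append(segs)
--     col_count = len(seg_lists[0])
--     for segs in seg_lists:
--         if len(segs) != col_count:
--             return False, "Inconsistent number of columns across table lines; ensure every line has the same number of '|' separators and cells."
--     # Compute max width per column across lines
--     max_widths = [0] * col_count
--     for segs in seg_lists:
--         for c in range(col_count):
--             max_widths[c] = max(max_widths[c], len(segs[c]))
--     # Require each segment to be padded (right or both sides) to the same width
--     failing_cols = set()
--     failing_rows = []
--     for r, segs in enumerate(seg_lists):
--         for c in range(col_count):
--             if len(segs[c]) != max_widths[c]:
--                 failing_cols.add(c + 1)
--                 failing_rows.append(r + 1)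
--     if failing_cols:
--         cols_str = ", ".join(str(c) for c in sorted(failing_cols))
--         return (
--             False,
--             f"Columns are not width-aligned. Pad cells with spaces so each column segment has the same width across lines. "
--             f"Columns failing width check: {cols_str}. Ensure vertical '|' characters line up across header and all data rows."
--         )
--     return True, "Columns appear width-aligned across all table lines."
-- ===== SOURCE B (Python) =====
-- from typing import Tuple, List, Optional
--
-- def _line_starts_and_ends_with_pipe(line: str) -> bool:
--     line = line.rstrip("\n")
--     return line.strip().startswith("|") and line.strip().endswith("|")
--
-- def _raw_segments(line: str) -> Optional[List[str]]:
--     if not _line_starts_and_ends_with_pipe(line):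
--         return None
--     parts = line.strip().split("|")
--     if len(parts) < 3:
--         return None
--     return parts[1:-1]
--
-- def _check_aligned_columns(lines: List[str]) -> Tuple[bool, str]:
--     if not lines:
--         return False, "No lines provided to alignment checker."
--     parsed = [_raw_segments(line) for line in lines]
--     if None in parsed:
--         bad_line = parsed.index(None)
--         return False, f"Line {bad_line + 1} does not start and end with '|' or is malformed."
--     seg_lists = [segs for segs in parsed if segs is not None]
--     first = seg_lists[0]
--     if any(len(segs) != len(first) for segs in seg_lists):
--         return False, "Inconsistent number of columns across table lines; ensure every line has the same number of '|' separators and cells."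
--     # A column is width-aligned iff every cell in it has the first row's cell width.
--     bad_cols = [c + 1 for c in range(len(first))
--                 if any(len(segs[c]) != len(first[c]) for segs in seg_lists)]
--     if bad_cols:
--         cols_str = ", ".join(str(c) for c in bad_cols)
--         return (
--             False,
--             f"Columns are not width-aligned. Pad cells with spaces so each column segment has the same width across lines. "
--             f"Columns failing width check: {cols_str}. Ensure vertical '|' characters line up across header and all data rows."
--         )
--     return True, "Columns appear width-aligned across all table lines."
-- ===== Notes on version B (the rewrite author's own statement) =====
-- stated objective: simpler
-- what changed: B drops A's maintained max-width table and failing-rows bookkeeping: it finds the first malformed line by mapping the parser over all lines and taking the index of the first failure, and decides each failing column by a direct per-column 'every cell width equals the first row's cell width' test, emitting the column numbers already in ascending order instead of collecting a set and sorting it.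
import Mathlib
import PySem

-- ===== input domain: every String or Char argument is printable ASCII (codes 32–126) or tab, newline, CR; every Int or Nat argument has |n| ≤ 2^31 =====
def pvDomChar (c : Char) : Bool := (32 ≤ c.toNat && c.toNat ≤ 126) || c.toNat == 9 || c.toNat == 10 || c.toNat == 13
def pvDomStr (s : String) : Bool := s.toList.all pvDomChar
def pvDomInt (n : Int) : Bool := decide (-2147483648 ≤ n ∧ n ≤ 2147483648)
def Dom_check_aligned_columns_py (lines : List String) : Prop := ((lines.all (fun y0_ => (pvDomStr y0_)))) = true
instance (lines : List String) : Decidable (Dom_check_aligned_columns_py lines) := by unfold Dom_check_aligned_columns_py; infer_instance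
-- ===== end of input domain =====

-- B replaces A's max-width table and row bookkeeping by a per-column "all widths equal the
-- first row's width" test (and finds the first malformed line via map + index): simpler, same values.

-- ===== PORT A =====

-- line.rstrip("\n"): PySem has no chars-argument rstrip; hand port, exact — drops trailing '\n' characters
def rstripNl (cs : List Char) : List Char := (cs.reverse.dropWhile (· == '\n')).reverse

-- _line_starts_and_ends_with_pipe (shared module helper, used by both A and B)
def lineStartsEndsPipe (cs : List Char) : Bool :=
  PySem.Chars.startswith (PySem.Chars.strip (rstripNl cs)) ['|'] &&
  PySem.Chars.endswith (PySem.Chars.strip (rstripNl cs)) ['|']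

-- _raw_segments (shared module helper, used by both A and B)
def rawSegments (line : String) : Option (List (List Char)) :=
  if !(lineStartsEndsPipe line.toList) then none
  else
    let parts := PySem.Chars.splitOn (PySem.Chars.strip line.toList) ['|']
    if parts.length < 3 then none
    else some (PySem.List.slice parts (some 1) (some (-1)))   -- parts[1:-1]

-- A's first loop: collect segments, early-returning the message of the first malformed line
def collectA (lines : List String) (idx : Nat) : Sum String (List (List (List Char))) :=
  match lines with
  | [] => .inr []
  | line :: rest =>
    match rawSegments line with
    | none => .inl ("Line " ++ PySem.Int.toStr ((idx : Int) + 1) ++ " does not start and end with '|' or is malformed.")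
    | some segs =>
      match collectA rest (idx + 1) with
      | .inl m => .inl m
      | .inr ss => .inr (segs :: ss)

-- A's second loop: its early-return message is constant, so the loop is this test
def countOkA (segLists : List (List (List Char))) (n : Nat) : Bool :=
  match segLists with
  | [] => true
  | segs :: rest => if segs.length ≠ n then false else countOkA rest n

-- A's max-width table; range(col_count) ported as List.range (col_count : Nat, so exact);
-- segs[c] ported as getD: in range whenever A reaches this loop (the count check passed), so exact
def maxWidthsA (segLists : List (List (List Char))) (n : Nat) : List Nat :=
  segLists.foldl
    (fun mw segs => (List.range n).foldl
      (fun mw c => mw.set c (max (mw.getD c 0) (segs.getD c []).length)) mw)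
    (List.replicate n 0)

-- A's failing_cols set and failing_rows list (failing_rows is maintained but never read by A)
def failingA (segLists : List (List (List Char))) (n : Nat) (mw : List Nat) :
    PySem.Set Int × List Int :=
  (PySem.List.enumerate segLists).foldl
    (fun st rsegs => (List.range n).foldl
      (fun st c =>
        if (rsegs.2.getD c []).length ≠ mw.getD c 0 then
          (st.1.add ((c : Int) + 1), st.2 ++ [rsegs.1 + 1])
        else st) st)
    (([] : PySem.Set Int), ([] : List Int))

def check_aligned_columns_py (lines : List String) : Bool × String :=
  if lines = [] then (false, "No lines provided to alignment checker.")
  else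
    match collectA lines 0 with
    | .inl msg => (false, msg)
    | .inr segLists =>
      let colCount := (PySem.List.pyGetD segLists 0 []).length   -- len(seg_lists[0]); in range, lines ≠ []
      if !countOkA segLists colCount then
        (false, "Inconsistent number of columns across table lines; ensure every line has the same number of '|' separators and cells.")
      else
        let mw := maxWidthsA segLists colCount
        let fc := (failingA segLists colCount mw).1
        if fc ≠ [] then
          (false, "Columns are not width-aligned. Pad cells with spaces so each column segment has the same width across lines. Columns failing width check: "
            ++ PySem.Str.join ", " ((PySem.List.sorted fc (fun x => x)).map PySem.Int.toStr)
            ++ ". Ensure vertical '|' characters line up across header and all data rows.")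
        else (true, "Columns appear width-aligned across all table lines.")

-- ===== PORT B =====

def check_aligned_columns_py_alt (lines : List String) : Bool × String :=
  if lines = [] then (false, "No lines provided to alignment checker.")
  else
    let parsed := lines.map rawSegments
    match PySem.List.index? parsed none with     -- None in parsed / parsed.index(None)
    | some i => (false, "Line " ++ PySem.Int.toStr ((i : Int) + 1) ++ " does not start and end with '|' or is malformed.")
    | none =>
      let segLists := parsed.filterMap id        -- [segs for segs in parsed if segs is not None]
      let first := PySem.List.pyGetD segLists 0 []   -- seg_lists[0]; in range, lines ≠ [] and no None
      if segLists.any (fun segs => segs.length ≠ first.length) then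
        (false, "Inconsistent number of columns across table lines; ensure every line has the same number of '|' separators and cells.")
      else
        -- segs[c] / first[c] ported as getD: in range by the count check, so exact
        let badCols := (List.range first.length).filterMap (fun c =>
          if segLists.any (fun segs => (segs.getD c []).length ≠ (first.getD c []).length)
          then some ((c : Int) + 1) else none)
        if badCols ≠ [] then
          (false, "Columns are not width-aligned. Pad cells with spaces so each column segment has the same width across lines. Columns failing width check: "
            ++ PySem.Str.join ", " (badCols.map PySem.Int.toStr)
            ++ ". Ensure vertical '|' characters line up across header and all data rows.")
        else (true, "Columns appear width-aligned across all table lines.")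

-- ===== PRECONDITION & SPEC =====
def Spec_check_aligned_columns_py (lines : List String) (out : Bool × String) : Prop := out = check_aligned_columns_py_alt lines
instance (lines : List String) (out : Bool × String) : Decidable (Spec_check_aligned_columns_py lines out) := by unfold Spec_check_aligned_columns_py; infer_instance

-- ===== CLAIM (what is proved, stated in full; the proofs are below) =====
def Claim_equal_check_aligned_columns_py : Prop := ∀ (lines : List String), Dom_check_aligned_columns_py lines → Spec_check_aligned_columns_py lines (check_aligned_columns_py lines)

-- ===== LEMMAS AND PROOFS =====

-- A's collect loop agrees with B's map-then-first-None analysis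
theorem collectA_eq (lines : List String) (idx : Nat) :
    collectA lines idx =
      match PySem.List.index? (lines.map rawSegments) none with
      | some i => .inl ("Line " ++ PySem.Int.toStr ((idx : Int) + (i : Int) + 1) ++ " does not start and end with '|' or is malformed.")
      | none => .inr ((lines.map rawSegments).filterMap id) := by
  induction lines generalizing idx with
  | nil => rfl
  | cons line rest ih =>
    simp only [collectA, List.map_cons, PySem.List.index?, List.idxOf?_cons]
    cases h : rawSegments line with
    | none => simp
    | some segs =>
      have hne : (some segs == (none : Option (List (List Char)))) = false := rfl
      rw [hne]
      simp only [if_false, Bool.false_eq_true]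
      rw [ih (idx + 1)]
      simp only [PySem.List.index?]
      cases hidx : List.idxOf? none (rest.map rawSegments) with
      | none => simp
      | some i =>
        simp only [Option.map_some]
        have hcast : (((idx + 1 : Nat) : Int) + (i : Int) + 1) = ((idx : Int) + ((i + 1 : Nat) : Int) + 1) := by
          push_cast; ring
        rw [hcast]

-- A's count loop is the negated any-test
theorem countOkA_eq (segLists : List (List (List Char))) (n : Nat) :
    countOkA segLists n = !segLists.any (fun segs => segs.length ≠ n) := by
  induction segLists with
  | nil => simp [countOkA]
  | cons s rest ih => by_cases h : s.length = n <;> simp [countOkA, h, ih]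

-- first projection of a pair-state fold
theorem foldl_fst {α β γ : Type} (l : List γ) (F : α × β → γ → α × β) (G : α → γ → α)
    (h : ∀ st y, (F st y).1 = G st.1 y) (st : α × β) :
    (l.foldl F st).1 = l.foldl G st.1 := by
  induction l generalizing st with
  | nil => rfl
  | cons y l ih => rw [List.foldl_cons, List.foldl_cons, ih, h]

-- membership / nodup of a fold of conditional Set.add
theorem mem_foldl_add_if {α β : Type} [BEq α] [LawfulBEq α] (l : List β) (p : β → Prop)
    [DecidablePred p] (f : β → α) (s : PySem.Set α) (x : α) :
    (x ∈ l.foldl (fun s y => if p y then s.add (f y) else s) s) ↔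
      x ∈ s ∨ ∃ y ∈ l, p y ∧ x = f y := by
  induction l generalizing s with
  | nil => simp
  | cons y l ih =>
    rw [List.foldl_cons]
    by_cases h : p y <;>
      simp [h, ih, PySem.Set.mem_add, or_assoc]

theorem nodup_foldl_add_if {α β : Type} [BEq α] [LawfulBEq α] (l : List β) (p : β → Prop)
    [DecidablePred p] (f : β → α) (s : PySem.Set α) (h : s.Nodup) :
    (l.foldl (fun s y => if p y then s.add (f y) else s) s).Nodup := by
  induction l generalizing s with
  | nil => exact h
  | cons y l ih =>
    rw [List.foldl_cons]
    by_cases hp : p y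
    · simp only [hp, if_pos]; exact ih _ (PySem.Set.nodup_add _ _ h)
    · rw [if_neg hp]; exact ih _ h

-- nested version for A's row × column loop
theorem mem_foldl_foldl_add_if {α β γ : Type} [BEq α] [LawfulBEq α] (rows : List γ)
    (inner : List β) (p : γ → β → Prop) [∀ r c, Decidable (p r c)] (f : β → α)
    (s : PySem.Set α) (x : α) :
    (x ∈ rows.foldl (fun s r => inner.foldl (fun s c => if p r c then s.add (f c) else s) s) s) ↔
      x ∈ s ∨ ∃ r ∈ rows, ∃ c ∈ inner, p r c ∧ x = f c := by
  induction rows generalizing s with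
  | nil => simp
  | cons r rows ih =>
    rw [List.foldl_cons, ih, mem_foldl_add_if]
    simp only [List.mem_cons]
    constructor
    · rintro ((h | ⟨c, hc, hp, hx⟩) | ⟨rr, hr, c, hc, hp, hx⟩)
      · exact Or.inl h
      · exact Or.inr ⟨r, Or.inl rfl, c, hc, hp, hx⟩
      · exact Or.inr ⟨rr, Or.inr hr, c, hc, hp, hx⟩
    · rintro (h | ⟨rr, (rfl | hr), c, hc, hp, hx⟩)
      · exact Or.inl (Or.inl h)
      · exact Or.inl (Or.inr ⟨c, hc, hp, hx⟩)
      · exact Or.inr ⟨rr, hr, c, hc, hp, hx⟩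

theorem nodup_foldl_foldl_add_if {α β γ : Type} [BEq α] [LawfulBEq α] (rows : List γ)
    (inner : List β) (p : γ → β → Prop) [∀ r c, Decidable (p r c)] (f : β → α)
    (s : PySem.Set α) (h : s.Nodup) :
    (rows.foldl (fun s r => inner.foldl (fun s c => if p r c then s.add (f c) else s) s) s).Nodup := by
  induction rows generalizing s with
  | nil => exact h
  | cons r rows ih =>
    rw [List.foldl_cons]
    exact ih _ (nodup_foldl_add_if inner (p r) f s h)

-- pointwise value of the fold-of-set loop over a nodup index list
theorem foldl_set_getD (g : Nat → Nat → Nat) (cs : List Nat) (hnd : cs.Nodup) (mw : List Nat) :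
    ((cs.foldl (fun mw c => mw.set c (g c (mw.getD c 0))) mw).length = mw.length) ∧
    (∀ d, (cs.foldl (fun mw c => mw.set c (g c (mw.getD c 0))) mw).getD d 0 =
      if d ∈ cs ∧ d < mw.length then g d (mw.getD d 0) else mw.getD d 0) := by
  induction cs generalizing mw with
  | nil => simp
  | cons c cs ih =>
    obtain ⟨hc, hnd'⟩ := List.nodup_cons.mp hnd
    rw [List.foldl_cons]
    obtain ⟨ihl, ihd⟩ := ih hnd' (mw.set c (g c (mw.getD c 0)))
    refine ⟨by rw [ihl, List.length_set], ?_⟩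
    intro d
    rw [ihd d, List.length_set]
    by_cases hdc : d = c
    · subst hdc
      have h1 : d ∉ cs := hc
      simp only [h1, false_and, if_false]
      by_cases hlt : d < mw.length
      · simp [List.getD_eq_getElem?_getD, hlt, List.mem_cons, true_or]
      · have hset : mw.set d (g d (mw.getD d 0)) = mw := List.set_eq_of_length_le (by omega)
        simp [List.mem_cons, hlt]
    · have h2 : (mw.set c (g c (mw.getD c 0))).getD d 0 = mw.getD d 0 := by
        simp [List.getD_eq_getElem?_getD, List.getElem?_set_ne (fun h => hdc h.symm)]
      rw [h2]
      simp [List.mem_cons, hdc]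

-- value of A's max-width table
theorem maxWidthsA_getD (segLists : List (List (List Char))) (n : Nat) (c : Nat) (hc : c < n) :
    (maxWidthsA segLists n).getD c 0 =
      segLists.foldl (fun a segs => max a (segs.getD c []).length) 0 := by
  have key : ∀ (ss : List (List (List Char))) (mw : List Nat), mw.length = n →
      ((ss.foldl (fun mw segs => (List.range n).foldl
        (fun mw c => mw.set c (max (mw.getD c 0) (segs.getD c []).length)) mw) mw).length = n) ∧
      ((ss.foldl (fun mw segs => (List.range n).foldl
        (fun mw c => mw.set c (max (mw.getD c 0) (segs.getD c []).length)) mw) mw).getD c 0 =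
        ss.foldl (fun a segs => max a (segs.getD c []).length) (mw.getD c 0)) := by
    intro ss
    induction ss with
    | nil => exact fun mw h => ⟨h, rfl⟩
    | cons segs ss ih =>
      intro mw hlen
      rw [List.foldl_cons, List.foldl_cons]
      obtain ⟨hl, hd⟩ := foldl_set_getD (fun c w => max w (segs.getD c []).length)
        (List.range n) (List.nodup_range) mw
      obtain ⟨ihl, ihd⟩ := ih _ (by rw [hl, hlen])
      refine ⟨ihl, ?_⟩
      rw [ihd, hd c]
      simp [List.mem_range, hc, hlen]
  rw [maxWidthsA, (key segLists _ (by simp)).2]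
  simp

-- fold of max over a constant-valued list
theorem foldl_max_const {β : Type} (l : List β) (W : β → Nat) (k : Nat)
    (h : ∀ s ∈ l, W s = k) (hne : l ≠ []) (a : Nat) :
    l.foldl (fun a s => max a (W s)) a = max a k := by
  induction l generalizing a with
  | nil => exact absurd rfl hne
  | cons s l ih =>
    rw [List.foldl_cons, h s List.mem_cons_self]
    cases l with
    | nil => rfl
    | cons t l =>
      rw [ih (fun x hx => h x (List.mem_cons_of_mem _ hx)) (by simp)]
      omega

-- the pivotal equivalence: some width differs from the max  ↔  some width differs from the first row's
theorem exists_ne_max_iff (first : List (List Char)) (rest : List (List (List Char))) (c : Nat) :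
    (∃ segs ∈ first :: rest, (segs.getD c []).length ≠
        (first :: rest).foldl (fun a segs => max a (segs.getD c []).length) 0) ↔
    (∃ segs ∈ first :: rest, (segs.getD c []).length ≠ (first.getD c []).length) := by
  constructor
  · rintro ⟨s, hs, hne⟩
    by_contra hall
    push Not at hall
    rw [foldl_max_const _ _ ((first.getD c []).length) hall (by simp) 0] at hne
    exact hne (by rw [hall s hs]; omega)
  · rintro ⟨s, hs, hne⟩
    by_cases hF : (first.getD c []).length =
        (first :: rest).foldl (fun a segs => max a (segs.getD c []).length) 0
    · exact ⟨s, hs, by rw [← hF]; exact hne⟩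
    · exact ⟨first, List.mem_cons_self, hF⟩

-- existential over enumerate projects to the list
theorem exists_enumerate {α : Type} (l : List α) (start : Int) (P : α → Prop) :
    (∃ rs ∈ PySem.List.enumerate l start, P rs.2) ↔ ∃ s ∈ l, P s := by
  induction l generalizing start with
  | nil => simp [PySem.List.enumerate]
  | cons x l ih => simp [PySem.List.enumerate, ih]


-- A's failing_cols set: the row list never feeds back into the set component
theorem failingA_fst (segLists : List (List (List Char))) (n : Nat) (mw : List Nat) :
    (failingA segLists n mw).1 =
      (PySem.List.enumerate segLists).foldl
        (fun s rsegs => (List.range n).foldl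
          (fun s c => if (rsegs.2.getD c []).length ≠ mw.getD c 0 then PySem.Set.add s ((c : Int) + 1) else s) s)
        ([] : PySem.Set Int) := by
  unfold failingA
  refine foldl_fst _ _ _ ?_ _
  intro st rsegs
  refine foldl_fst _ _ _ ?_ st
  intro st2 c
  split <;> rfl

-- the width phase: A's sorted failing-column set IS B's filterMap list, and both empty together
theorem core_width (first : List (List Char)) (rest : List (List (List Char))) (n : Nat) :
    PySem.List.sorted (failingA (first :: rest) n (maxWidthsA (first :: rest) n)).1 (fun x => x) =
      (List.range n).filterMap (fun c =>
        if (first :: rest).any (fun segs => (segs.getD c []).length ≠ (first.getD c []).length)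
        then some ((c : Int) + 1) else none) ∧
    ((failingA (first :: rest) n (maxWidthsA (first :: rest) n)).1 = [] ↔
      (List.range n).filterMap (fun c =>
        if (first :: rest).any (fun segs => (segs.getD c []).length ≠ (first.getD c []).length)
        then some ((c : Int) + 1) else none) = []) := by
  have hfst := failingA_fst (first :: rest) n (maxWidthsA (first :: rest) n)
  have hmemfc : ∀ x, x ∈ (failingA (first :: rest) n (maxWidthsA (first :: rest) n)).1 ↔
      ∃ c, c < n ∧ (first :: rest).any
        (fun segs => (segs.getD c []).length ≠ (first.getD c []).length) = true ∧ x = (c : Int) + 1 := by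
    intro x
    rw [hfst, mem_foldl_foldl_add_if]
    simp only [List.not_mem_nil, false_or]
    constructor
    · rintro ⟨r, hr, c, hc, hp, hx⟩
      rw [List.mem_range] at hc
      refine ⟨c, hc, ?_, hx⟩
      rw [List.any_eq_true]
      have hex : ∃ s ∈ first :: rest, (s.getD c []).length ≠ (maxWidthsA (first :: rest) n).getD c 0 :=
        (exists_enumerate (first :: rest) 0 _).mp ⟨r, hr, hp⟩
      rw [maxWidthsA_getD _ n c hc] at hex
      obtain ⟨s, hs, hné⟩ := (exists_ne_max_iff first rest c).mp hex
      exact ⟨s, hs, by simpa using hné⟩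
    · rintro ⟨c, hc, hany, hx⟩
      rw [List.any_eq_true] at hany
      obtain ⟨s, hs, hné⟩ := hany
      have hex : ∃ s ∈ first :: rest, (s.getD c []).length ≠
          ((first :: rest).foldl (fun a segs => max a (segs.getD c []).length) 0) :=
        (exists_ne_max_iff first rest c).mpr ⟨s, hs, by simpa using hné⟩
      rw [← maxWidthsA_getD _ n c hc] at hex
      obtain ⟨r, hr, hp⟩ := (exists_enumerate (first :: rest) 0 _).mpr hex
      exact ⟨r, hr, c, List.mem_range.mpr hc, hp, hx⟩
  have hmembad : ∀ x, x ∈ (List.range n).filterMap (fun c =>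
      if (first :: rest).any (fun segs => (segs.getD c []).length ≠ (first.getD c []).length)
      then some ((c : Int) + 1) else none) ↔
      ∃ c, c < n ∧ (first :: rest).any
        (fun segs => (segs.getD c []).length ≠ (first.getD c []).length) = true ∧ x = (c : Int) + 1 := by
    intro x
    rw [List.mem_filterMap]
    constructor
    · rintro ⟨c, hc, hsome⟩
      rw [List.mem_range] at hc
      by_cases h : (first :: rest).any (fun segs => (segs.getD c []).length ≠ (first.getD c []).length) = true
      · rw [if_pos h] at hsome
        exact ⟨c, hc, h, (Option.some_inj.mp hsome).symm⟩
      · rw [if_neg h] at hsome; exact absurd hsome (by simp)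
    · rintro ⟨c, hc, hany, hx⟩
      exact ⟨c, List.mem_range.mpr hc, by rw [if_pos hany, hx]⟩
  have hnodupfc : (failingA (first :: rest) n (maxWidthsA (first :: rest) n)).1.Nodup := by
    rw [hfst]
    exact nodup_foldl_foldl_add_if _ _ _ _ _ List.nodup_nil
  have hpairbad : List.Pairwise (fun a b : Int => a < b)
      ((List.range n).filterMap (fun c =>
        if (first :: rest).any (fun segs => (segs.getD c []).length ≠ (first.getD c []).length)
        then some ((c : Int) + 1) else none)) := by
    rw [List.pairwise_filterMap]
    refine List.Pairwise.imp ?_ (List.pairwise_lt_range (n := n))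
    intro a b hab x hx y hy
    have hxa : x = (a : Int) + 1 := by
      by_cases h : (first :: rest).any (fun segs => (segs.getD a []).length ≠ (first.getD a []).length) = true
      · rw [if_pos h] at hx; exact (Option.some_inj.mp hx).symm
      · rw [if_neg h] at hx; exact absurd hx (by simp)
    have hyb : y = (b : Int) + 1 := by
      by_cases h : (first :: rest).any (fun segs => (segs.getD b []).length ≠ (first.getD b []).length) = true
      · rw [if_pos h] at hy; exact (Option.some_inj.mp hy).symm
      · rw [if_neg h] at hy; exact absurd hy (by simp)
    rw [hxa, hyb]
    omega
  have hnodupbad := hpairbad.imp (fun h => ne_of_lt h)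
  have hperm : ((List.range n).filterMap (fun c =>
      if (first :: rest).any (fun segs => (segs.getD c []).length ≠ (first.getD c []).length)
      then some ((c : Int) + 1) else none)).Perm
      (failingA (first :: rest) n (maxWidthsA (first :: rest) n)).1 := by
    rw [List.perm_ext_iff_of_nodup hnodupbad hnodupfc]
    intro a
    rw [hmemfc, hmembad]
  refine ⟨PySem.List.sorted_eq_of_perm_of_pairwise_lt _ _ _ hperm hpairbad, ?_⟩
  constructor
  · intro h
    have := hperm.length_eq
    rw [h] at this
    exact List.eq_nil_of_length_eq_zero (by simpa using this)
  · intro h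
    have := hperm.length_eq
    rw [h] at this
    exact List.eq_nil_of_length_eq_zero (by simpa using this.symm)

-- ===== VERDICT (by name: the statement is the Claim_ definition above) =====
theorem check_aligned_columns_py_spec : Claim_equal_check_aligned_columns_py := by
  unfold Claim_equal_check_aligned_columns_py
  intro lines _
  unfold Spec_check_aligned_columns_py
  unfold check_aligned_columns_py check_aligned_columns_py_alt
  by_cases hnil : lines = []
  · simp [hnil]
  · rw [if_neg hnil, if_neg hnil, collectA_eq lines 0]
    simp only [PySem.List.index?]
    cases hidx : List.idxOf? none (List.map rawSegments lines) with
    | some i => simp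
    | none =>
      obtain ⟨line, rest, rfl⟩ := List.exists_cons_of_ne_nil hnil
      have hline : ∃ s, rawSegments line = some s := by
        cases h : rawSegments line with
        | some s => exact ⟨s, rfl⟩
        | none =>
          rw [List.map_cons, h, List.idxOf?_cons] at hidx
          simp at hidx
      obtain ⟨s, hs⟩ := hline
      have hseg : ((line :: rest).map rawSegments).filterMap id =
          s :: (rest.map rawSegments).filterMap id := by
        rw [List.map_cons, List.filterMap_cons, hs]; rfl
      rw [hseg]
      dsimp only []
      have hfirst : PySem.List.pyGetD (s :: (rest.map rawSegments).filterMap id) (0 : Int) [] = s := by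
        simp [pysem]
      rw [hfirst, countOkA_eq]
      by_cases hany : (s :: (rest.map rawSegments).filterMap id).any
          (fun segs => segs.length ≠ s.length) = true
      · rw [hany]; rfl
      · rw [Bool.not_eq_true] at hany
        rw [hany]
        simp only [Bool.not_false, Bool.false_eq_true, if_false]
        rw [if_neg (by decide)]
        obtain ⟨hsorted, hempty⟩ := core_width s ((rest.map rawSegments).filterMap id) s.length
        by_cases hb : (List.range s.length).filterMap (fun c =>
            if (s :: (rest.map rawSegments).filterMap id).any
              (fun segs => (segs.getD c []).length ≠ (s.getD c []).length)
            then some ((c : Int) + 1) else none) = []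
        · rw [if_neg (fun h => h (hempty.mpr hb)), if_neg (fun h => h hb)]
        · rw [if_pos (fun hfc => hb (hempty.mp hfc)), if_pos hb, hsorted]
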